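-- pv_equiv track=rewrite | github.com/dislovelhl/acgs2 | scripts/split_test_files.py | _group_by_functionality
-- ===== SOURCE A (Python) =====
-- from typing import Dict, List, Tuple
--
-- def _group_by_functionality(sections: Dict[str, List[str]]) -> Dict[str, List[str]]:
--     """Group test classes by functionality."""
--     functional_groups = {
--         "lifecycle": [],
--         "agent_management": [],
--         "messaging": [],
--         "routing": [],
--         "security": [],
--         "monitoring": [],
--         "edge_cases": [],
--     }
--
--     for section, classes in sections.items():
--         if "lifecycle" in section:
--             functional_groups["lifecycle"].extend(classes)
--         elif any(word in section for word in ["registration", "filtering"]):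
--             functional_groups["agent_management"].extend(classes)
--         elif any(word in section for word in ["sending", "receiving", "broadcast"]):
--             functional_groups["messaging"].extend(classes)
--         elif any(word in section for word in ["routing", "queue", "kafka"]):
--             functional_groups["routing"].extend(classes)
--         elif any(word in section for word in ["hash", "strict", "isolation"]):
--             functional_groups["security"].extend(classes)
--         elif "metrics" in section:
--             functional_groups["monitoring"].extend(classes)
--         else:
--             functional_groups["edge_cases"].extend(classes)
--
--     return functional_groups
-- ===== SOURCE B (Python) =====
-- from typing import Dict, List
--
-- _RULES = [
--     ("lifecycle", ["lifecycle"]),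
--     ("agent_management", ["registration", "filtering"]),
--     ("messaging", ["sending", "receiving", "broadcast"]),
--     ("routing", ["routing", "queue", "kafka"]),
--     ("security", ["hash", "strict", "isolation"]),
--     ("monitoring", ["metrics"]),
-- ]
--
-- def _classify(section: str) -> str:
--     for name, words in _RULES:
--         if any(word in section for word in words):
--             return name
--     return "edge_cases"
--
-- def _group_by_functionality(sections: Dict[str, List[str]]) -> Dict[str, List[str]]:
--     """Group test classes by functionality."""
--     names = [name for name, _ in _RULES] + ["edge_cases"]
--     return {
--         name: [c for section, classes in sections.items()
--                if _classify(section) == name for c in classes]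
--         for name in names
--     }
-- ===== Notes on version B (the rewrite author's own statement) =====
-- stated objective: simpler
-- what changed: Replaces the mutable dict plus seven-branch if/elif chain with an ordered rule table and a classify helper, building the result as a dict comprehension that collects each group's classes in one expression.
import Mathlib
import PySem

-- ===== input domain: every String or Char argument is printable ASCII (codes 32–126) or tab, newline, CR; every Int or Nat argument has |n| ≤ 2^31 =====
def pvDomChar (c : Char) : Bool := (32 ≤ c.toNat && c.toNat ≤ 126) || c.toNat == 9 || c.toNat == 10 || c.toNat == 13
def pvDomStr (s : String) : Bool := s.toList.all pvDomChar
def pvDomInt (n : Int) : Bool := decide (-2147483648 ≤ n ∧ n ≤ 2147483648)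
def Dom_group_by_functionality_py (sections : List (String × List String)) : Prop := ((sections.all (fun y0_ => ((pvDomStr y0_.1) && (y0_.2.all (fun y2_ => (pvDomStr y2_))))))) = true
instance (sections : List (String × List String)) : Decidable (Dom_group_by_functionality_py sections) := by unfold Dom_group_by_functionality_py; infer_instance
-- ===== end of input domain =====

-- B replaces A's mutable dict + if/elif chain by a rule table and a per-group
-- comprehension (objective: simpler decomposition, same cost).

-- ===== PORT A =====
-- the loop body: the if/elif chain, in A's branch order
def gA_step (d : PySem.Dict String (List String)) (p : String × List String) :
    PySem.Dict String (List String) :=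
  let sec := p.1
  let classes := p.2
  if PySem.Str.isIn "lifecycle" sec then
    d.modify "lifecycle" [] (· ++ classes)
  else if (["registration", "filtering"].any (fun w => PySem.Str.isIn w sec)) then
    d.modify "agent_management" [] (· ++ classes)
  else if (["sending", "receiving", "broadcast"].any (fun w => PySem.Str.isIn w sec)) then
    d.modify "messaging" [] (· ++ classes)
  else if (["routing", "queue", "kafka"].any (fun w => PySem.Str.isIn w sec)) then
    d.modify "routing" [] (· ++ classes)
  else if (["hash", "strict", "isolation"].any (fun w => PySem.Str.isIn w sec)) then
    d.modify "security" [] (· ++ classes)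
  else if PySem.Str.isIn "metrics" sec then
    d.modify "monitoring" [] (· ++ classes)
  else
    d.modify "edge_cases" [] (· ++ classes)

def group_by_functionality_py (sections : List (String × List String)) :
    List (String × List String) :=
  let init : PySem.Dict String (List String) := PySem.Dict.ofList
    [("lifecycle", []), ("agent_management", []), ("messaging", []), ("routing", []),
     ("security", []), ("monitoring", []), ("edge_cases", [])]
  (sections.foldl gA_step init).items

-- ===== PORT B =====
def gB_rules : List (String × List String) :=
  [("lifecycle", ["lifecycle"]),
   ("agent_management", ["registration", "filtering"]),
   ("messaging", ["sending", "receiving", "broadcast"]),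
   ("routing", ["routing", "queue", "kafka"]),
   ("security", ["hash", "strict", "isolation"]),
   ("monitoring", ["metrics"])]

def gB_classify (sec : String) : String :=
  match gB_rules.find? (fun r => r.2.any (fun w => PySem.Str.isIn w sec)) with
  | some r => r.1
  | none => "edge_cases"

def group_by_functionality_py_alt (sections : List (String × List String)) :
    List (String × List String) :=
  (gB_rules.map (·.1) ++ ["edge_cases"]).map (fun name =>
    (name, (sections.filter (fun p => gB_classify p.1 == name)).flatMap (·.2)))

-- ===== PRECONDITION & SPEC =====
def Spec_group_by_functionality_py (sections : List (String × List String)) (out : List (String × List String)) : Prop := out = group_by_functionality_py_alt sections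
instance (sections : List (String × List String)) (out : List (String × List String)) : Decidable (Spec_group_by_functionality_py sections out) := by unfold Spec_group_by_functionality_py; infer_instance

-- ===== CLAIM (what is proved, stated in full; the proofs are below) =====
def Claim_equal_group_by_functionality_py : Prop := ∀ (sections : List (String × List String)), Dom_group_by_functionality_py sections → Spec_group_by_functionality_py sections (group_by_functionality_py sections)

-- ===== LEMMAS AND PROOFS =====

-- B's value for one group, as a function of the group name
def gGroup (name : String) (sections : List (String × List String)) : List String :=
  (sections.filter (fun p => gB_classify p.1 == name)).flatMap (·.2)

lemma find?_cons_if {α : Type} (p : α → Bool) (a : α) (l : List α) :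
    (a :: l).find? p = if p a then some a else l.find? p := by
  cases h : p a <;> simp [h]

lemma gA_step_eq (d : PySem.Dict String (List String)) (p : String × List String) :
    gA_step d p = d.modify (gB_classify p.1) [] (· ++ p.2) := by
  unfold gA_step gB_classify gB_rules
  simp only [find?_cons_if, List.find?_nil, List.any_cons, List.any_nil, Bool.or_false]
  split_ifs <;> rfl

lemma gGroup_cons (name : String) (p : String × List String)
    (rest : List (String × List String)) :
    gGroup name (p :: rest) =
      (if gB_classify p.1 == name then p.2 else []) ++ gGroup name rest := by
  simp only [gGroup, List.filter]
  split <;> simp_all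

lemma gB_classify_mem (s : String) :
    gB_classify s = "lifecycle" ∨ gB_classify s = "agent_management" ∨
    gB_classify s = "messaging" ∨ gB_classify s = "routing" ∨
    gB_classify s = "security" ∨ gB_classify s = "monitoring" ∨
    gB_classify s = "edge_cases" := by
  unfold gB_classify gB_rules
  simp only [find?_cons_if, List.find?_nil]
  split_ifs <;> simp

lemma fold_items (sections : List (String × List String))
    (l1 l2 l3 l4 l5 l6 l7 : List String) :
    (sections.foldl gA_step (PySem.Dict.mk
      [("lifecycle", l1), ("agent_management", l2), ("messaging", l3), ("routing", l4),
       ("security", l5), ("monitoring", l6), ("edge_cases", l7)])).items =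
    [("lifecycle", l1 ++ gGroup "lifecycle" sections),
     ("agent_management", l2 ++ gGroup "agent_management" sections),
     ("messaging", l3 ++ gGroup "messaging" sections),
     ("routing", l4 ++ gGroup "routing" sections),
     ("security", l5 ++ gGroup "security" sections),
     ("monitoring", l6 ++ gGroup "monitoring" sections),
     ("edge_cases", l7 ++ gGroup "edge_cases" sections)] := by
  induction sections generalizing l1 l2 l3 l4 l5 l6 l7 with
  | nil => simp [gGroup]
  | cons p rest ih =>
    rw [List.foldl_cons, gA_step_eq]
    rcases gB_classify_mem p.1 with h | h | h | h | h | h | h <;>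
      rw [h] <;>
      simp only [PySem.Dict.modify, PySem.Dict.insert, PySem.Dict.contains,
        PySem.Dict.getD, PySem.Dict.get?] <;>
      simp <;>
      rw [ih] <;>
      simp [gGroup_cons, h]

-- ===== VERDICT (by name: the statement is the Claim_ definition above) =====
theorem group_by_functionality_py_spec : Claim_equal_group_by_functionality_py := by
  intro sections _
  unfold Spec_group_by_functionality_py group_by_functionality_py group_by_functionality_py_alt
  have hinit : (PySem.Dict.ofList
      ([("lifecycle", []), ("agent_management", []), ("messaging", []), ("routing", []),
        ("security", []), ("monitoring", []), ("edge_cases", [])] :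
        List (String × List String))) = PySem.Dict.mk
      [("lifecycle", []), ("agent_management", []), ("messaging", []), ("routing", []),
       ("security", []), ("monitoring", []), ("edge_cases", [])] := by decide
  rw [hinit, fold_items]
  simp [gB_rules, gGroup]
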